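-- pv_equiv track=rewrite | github.com/Coxwain220/analyst-app | convert_to_capacitor_v3.py | find_function_range
-- ===== SOURCE A (Python) =====
-- def find_function_range(lines, start_idx, func_signature):
--     """Find the complete range of a function including all its braces"""
--     brace_count = 0
--     started = False
--
--     for i in range(start_idx, len(lines)):
--         line = lines[i]
--
--         if func_signature in line:
--             started = True
--
--         if started:
--             # Count braces on this line
--             brace_count += line.count('{')
--             brace_count -= line.count('}')
--
--             if brace_count == 0 and started:
--                 return start_idx, i + 1  # Return range including this line
--
--     return start_idx, start_idx + 1
-- ===== SOURCE B (Python) =====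
-- def find_function_range(lines, start_idx, func_signature):
--     """Find the complete range of a function including all its braces"""
--     idxs = list(range(start_idx, len(lines)))
--     deltas = [lines[i].count('{') - lines[i].count('}') for i in idxs]
--     hits = [func_signature in lines[i] for i in idxs]
--     sums = [0]
--     for d in deltas:
--         sums.append(sums[-1] + d)
--     j = next((t for t, h in enumerate(hits) if h), None)
--     if j is None:
--         return start_idx, start_idx + 1
--     target = sums[j]
--     k = next((t for t in range(j, len(idxs)) if sums[t + 1] == target), None)
--     if k is None:
--         return start_idx, start_idx + 1
--     return start_idx, idxs[k] + 1
-- ===== Notes on version B (the rewrite author's own statement) =====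
-- stated objective: alternative
-- what changed: Replaces A's single stateful loop (started flag + running brace counter) by precomputed arrays: per-line brace deltas and signature hits, a prefix-sum array of the deltas, then two pure searches -- the first hit index j, and the first position k >= j where the prefix sum returns to its value at j; no mutable balance state is carried through the scan.
import Mathlib
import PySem

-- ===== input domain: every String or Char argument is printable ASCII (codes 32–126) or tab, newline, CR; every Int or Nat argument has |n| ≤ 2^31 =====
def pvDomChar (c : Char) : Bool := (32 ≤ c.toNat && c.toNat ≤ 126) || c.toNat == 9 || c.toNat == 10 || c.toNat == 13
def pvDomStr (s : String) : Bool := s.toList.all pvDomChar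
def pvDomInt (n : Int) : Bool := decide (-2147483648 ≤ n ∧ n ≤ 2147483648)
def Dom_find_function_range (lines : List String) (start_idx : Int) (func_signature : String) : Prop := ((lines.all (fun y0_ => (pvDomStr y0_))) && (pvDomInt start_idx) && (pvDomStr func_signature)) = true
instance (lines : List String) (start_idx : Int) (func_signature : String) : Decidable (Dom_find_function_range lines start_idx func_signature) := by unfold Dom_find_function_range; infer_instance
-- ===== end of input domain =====

-- B replaces A's stateful flag+counter loop by precomputed per-line delta/hit arrays and a prefix-sum
-- array, locating the end as the first position where the prefix sum returns to its value at the
-- signature line; same cost, different data structure. Pre_ excludes inputs where both raise IndexError.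


-- ===== PORT A =====
-- the for-loop of A over range(start_idx, len(lines)) with state (brace_count, started)
def findA_loop (lines : List String) (start_idx : Int) (func_signature : String) :
    List Int → Int → Bool → Int × Int
  | [], _, _ => (start_idx, start_idx + 1)
  | i :: rest, brace_count, started =>
    let line := (PySem.List.pyGet? lines i).getD ""   -- in range under Pre_
    let started' := started || PySem.Str.isIn func_signature line
    if started' then
      let bc := brace_count + (PySem.Str.count line "{" : Int) - (PySem.Str.count line "}" : Int)
      if bc = 0 then (start_idx, i + 1)
      else findA_loop lines start_idx func_signature rest bc started'
    else findA_loop lines start_idx func_signature rest brace_count started'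

def find_function_range (lines : List String) (start_idx : Int) (func_signature : String) : Int × Int :=
  findA_loop lines start_idx func_signature (PySem.List.pyRange start_idx (lines.length : Int) 1) 0 false

-- ===== PORT B =====
-- the 'sums' list built by B's append loop: sums = [0]; for d in deltas: sums.append(sums[-1]+d)
def prefixSums : Int → List Int → List Int
  | a, [] => [a]
  | a, d :: ds => a :: prefixSums (a + d) ds

-- next((t for t, h in enumerate(hits) if h), None)
def firstTrue : Nat → List Bool → Option Nat
  | _, [] => none
  | t, b :: rest => if b then some t else firstTrue (t + 1) rest

-- next((t for t in range(j, len(idxs)) if sums[t+1] == target), None); sums[t+1] is always in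
-- range here (t < len(idxs), |sums| = len(idxs)+1), so getD is exact
def findBalIdx (sums : List Int) (target : Int) : List Nat → Option Nat
  | [] => none
  | t :: rest => if sums.getD (t + 1) 0 = target then some t else findBalIdx sums target rest

def find_function_range_alt (lines : List String) (start_idx : Int) (func_signature : String) : Int × Int :=
  let idxs := PySem.List.pyRange start_idx (lines.length : Int) 1
  let deltas := idxs.map (fun i =>
    ((PySem.Str.count ((PySem.List.pyGet? lines i).getD "") "{" : Int)
      - (PySem.Str.count ((PySem.List.pyGet? lines i).getD "") "}" : Int)))
  let hits := idxs.map (fun i => PySem.Str.isIn func_signature ((PySem.List.pyGet? lines i).getD ""))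
  let sums := prefixSums 0 deltas
  match firstTrue 0 hits with
  | none => (start_idx, start_idx + 1)
  | some j =>
    let target := sums.getD j 0            -- sums[j], j < |sums|: exact
    match findBalIdx sums target (List.range' j (idxs.length - j)) with
    | none => (start_idx, start_idx + 1)
    | some k => (start_idx, (idxs.getD k 0) + 1)   -- idxs[k], k < |idxs|: exact

-- ===== PRECONDITION & SPEC =====
-- Pre_ excludes exactly the inputs where A (and B) raise IndexError: a start_idx below -len(lines)
-- whose range(start_idx, len(lines)) is nonempty, so lines[start_idx] is out of range.
def Pre_find_function_range (lines : List String) (start_idx : Int) (func_signature : String) : Prop :=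
  -(lines.length : Int) ≤ start_idx ∨ (lines.length : Int) ≤ start_idx
instance (lines : List String) (start_idx : Int) (func_signature : String) : Decidable (Pre_find_function_range lines start_idx func_signature) := by unfold Pre_find_function_range; infer_instance

def pvWitness_find_function_range : List String × Int × String := (["int f() {", "  g();", "}"], 0, "f(")

def Spec_find_function_range (lines : List String) (start_idx : Int) (func_signature : String) (out : Int × Int) : Prop := out = find_function_range_alt lines start_idx func_signature
instance (lines : List String) (start_idx : Int) (func_signature : String) (out : Int × Int) : Decidable (Spec_find_function_range lines start_idx func_signature out) := by unfold Spec_find_function_range; infer_instance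

-- ===== CLAIM (what is proved, stated in full; the proofs are below) =====
def Claim_equal_find_function_range : Prop := ∀ (lines : List String) (start_idx : Int) (func_signature : String), Dom_find_function_range lines start_idx func_signature → Pre_find_function_range lines start_idx func_signature → Spec_find_function_range lines start_idx func_signature (find_function_range lines start_idx func_signature)

-- ===== LEMMAS AND PROOFS =====

theorem prefixSums_getD (ds : List Int) :
    ∀ (a : Int) (k : Nat), k ≤ ds.length → (prefixSums a ds).getD k 0 = a + (ds.take k).sum := by
  induction ds with
  | nil =>
    intro a k hk
    have hk0 : k = 0 := by simpa using hk
    subst hk0; simp [prefixSums]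
  | cons d ds ih =>
    intro a k hk
    cases k with
    | zero => simp [prefixSums]
    | succ m =>
      simp only [prefixSums, List.getD, List.getElem?_cons_succ, List.take_succ_cons,
        List.sum_cons]
      have := ih (a + d) m (by simpa using hk)
      simp only [List.getD] at this
      rw [this]; ring

-- step relation of the prefix-sum array
theorem prefixSums_step (ds : List Int) (t : Nat) (ht : t < ds.length) :
    (prefixSums 0 ds).getD (t + 1) 0 = (prefixSums 0 ds).getD t 0 + ds.getD t 0 := by
  rw [prefixSums_getD ds 0 (t + 1) (by omega), prefixSums_getD ds 0 t (by omega)]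
  rw [List.sum_take_succ ds t ht]
  simp [List.getD, List.getElem?_eq_getElem ht]

theorem getD_map_lt {f : Int → Int} (L : List Int) (t : Nat) (ht : t < L.length) :
    (L.map f).getD t 0 = f (L[t]) := by
  simp [List.getD, List.getElem?_map, List.getElem?_eq_getElem ht]

-- if the signature is on the first remaining line, A's flag turns true immediately
theorem findA_start (lines : List String) (s : Int) (fs : String) (i : Int) (rest : List Int)
    (bc : Int) (hin : PySem.Str.isIn fs ((PySem.List.pyGet? lines i).getD "") = true) :
    findA_loop lines s fs (i :: rest) bc false = findA_loop lines s fs (i :: rest) bc true := by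
  have hin' : PySem.Chars.isIn fs.toList ((PySem.List.pyGet? lines i).getD "").toList = true := by
    simpa [PySem.Str.isIn] using hin
  simp [findA_loop, hin']

-- Phase 2: once started at position t with balance S[t] - target, A's loop returns at the first
-- position k ≥ t with S[k+1] = target — exactly B's findBalIdx search.
theorem phase2 (lines : List String) (s : Int) (fs : String) (L : List Int)
    (ds : List Int)
    (hds : ds = L.map (fun i =>
      ((PySem.Str.count ((PySem.List.pyGet? lines i).getD "") "{" : Int)
        - (PySem.Str.count ((PySem.List.pyGet? lines i).getD "") "}" : Int)))) :
    ∀ (m t : Nat), L.length - t = m → t ≤ L.length → ∀ target : Int,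
      findA_loop lines s fs (L.drop t) ((prefixSums 0 ds).getD t 0 - target) true =
        (match findBalIdx (prefixSums 0 ds) target (List.range' t (L.length - t)) with
          | none => (s, s + 1)
          | some k => (s, L.getD k 0 + 1)) := by
  intro m
  induction m with
  | zero =>
    intro t hm ht target
    have hteq : t = L.length := by omega
    rw [hm, hteq, List.drop_length]
    rfl
  | succ m ih =>
    intro t hm ht target
    have hlt : t < L.length := by omega
    have hdl : ds.length = L.length := by rw [hds]; simp
    rw [List.drop_eq_getElem_cons hlt, hm, List.range'_succ]
    have hδ : ds.getD t 0 =
        ((PySem.Str.count ((PySem.List.pyGet? lines (L[t])).getD "") "{" : Int)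
          - (PySem.Str.count ((PySem.List.pyGet? lines (L[t])).getD "") "}" : Int)) := by
      rw [hds]; exact getD_map_lt L t hlt
    have hstep := prefixSums_step ds t (by omega)
    by_cases hzero : (prefixSums 0 ds).getD (t + 1) 0 = target
    · simp only [findA_loop, Bool.true_or, if_true, findBalIdx, hzero]
      rw [if_pos (by omega)]
      simp [List.getD, List.getElem?_eq_getElem hlt]
    · simp only [findA_loop, Bool.true_or, if_true, findBalIdx, if_neg hzero]
      rw [if_neg (by omega)]
      have hbc : (prefixSums 0 ds).getD t 0 - target
          + (PySem.Str.count ((PySem.List.pyGet? lines (L[t])).getD "") "{" : Int)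
          - (PySem.Str.count ((PySem.List.pyGet? lines (L[t])).getD "") "}" : Int)
          = (prefixSums 0 ds).getD (t + 1) 0 - target := by omega
      rw [hbc]
      have := ih (t + 1) (by omega) (by omega) target
      rw [show L.length - (t + 1) = m from by omega] at this
      exact this

-- Phase 1: before the flag is set, A skips exactly the lines B's firstTrue skips.
theorem phase1 (lines : List String) (s : Int) (fs : String) (L : List Int)
    (ds : List Int) (hs : List Bool)
    (hds : ds = L.map (fun i =>
      ((PySem.Str.count ((PySem.List.pyGet? lines i).getD "") "{" : Int)
        - (PySem.Str.count ((PySem.List.pyGet? lines i).getD "") "}" : Int))))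
    (hhs : hs = L.map (fun i => PySem.Str.isIn fs ((PySem.List.pyGet? lines i).getD ""))) :
    ∀ (m t : Nat), L.length - t = m → t ≤ L.length →
      findA_loop lines s fs (L.drop t) 0 false =
        (match firstTrue t (hs.drop t) with
          | none => (s, s + 1)
          | some j =>
            match findBalIdx (prefixSums 0 ds) ((prefixSums 0 ds).getD j 0)
                (List.range' j (L.length - j)) with
            | none => (s, s + 1)
            | some k => (s, L.getD k 0 + 1)) := by
  intro m
  induction m with
  | zero =>
    intro t hm ht
    have hteq : t = L.length := by omega
    have hhl : hs.length = L.length := by rw [hhs]; simp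
    rw [hteq, List.drop_length, show hs.drop L.length = [] from by
      rw [List.drop_eq_nil_iff]; omega]
    rfl
  | succ m ih =>
    intro t hm ht
    have hlt : t < L.length := by omega
    have hhl : hs.length = L.length := by rw [hhs]; simp
    have hhlt : t < hs.length := by omega
    rw [List.drop_eq_getElem_cons hlt, List.drop_eq_getElem_cons hhlt]
    have hht : hs[t] = PySem.Str.isIn fs ((PySem.List.pyGet? lines (L[t])).getD "") := by
      subst hhs; simp
    by_cases hin : PySem.Str.isIn fs ((PySem.List.pyGet? lines (L[t])).getD "") = true
    · rw [findA_start lines s fs (L[t]) _ 0 hin]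
      have hp2 := phase2 lines s fs L ds hds (m + 1) t hm ht ((prefixSums 0 ds).getD t 0)
      rw [sub_self] at hp2
      rw [← List.drop_eq_getElem_cons hlt, hp2]
      simp only [firstTrue, hht, hin, if_true]
    · have hinb : PySem.Str.isIn fs ((PySem.List.pyGet? lines (L[t])).getD "") = false := by
        simpa using hin
      have hfalse : hs[t] = false := by rw [hht]; simpa using hin
      simp only [findA_loop, hinb, Bool.false_or, Bool.false_eq_true, if_false, firstTrue, hfalse]
      exact ih (t + 1) (by omega) (by omega)

-- ===== VERDICT (by name: the statement is the Claim_ definition above) =====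
theorem find_function_range_spec : Claim_equal_find_function_range := by
  intro lines start_idx func_signature _ _
  unfold Spec_find_function_range find_function_range find_function_range_alt
  have := phase1 lines start_idx func_signature
    (PySem.List.pyRange start_idx (lines.length : Int) 1) _ _ rfl rfl
    (PySem.List.pyRange start_idx (lines.length : Int) 1).length 0 (by omega) (by omega)
  simpa using this
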